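-- pv_equiv track=rewrite | github.com/YunTianZhou/LeetcodeContest | Weekly Contest 467/3686. Number of Stable Subsequences.py | countStableSubsequences
-- ===== SOURCE A (Python) =====
-- from typing import List
--
-- def countStableSubsequences(nums: List[int]) -> int:
--     mod = 10 ** 9 + 7
--
--     e1 = e2 = o1 = o2 = 0
--     for x in nums:
--         if x % 2 == 0:
--             ne1 = (e1 + o1 + o2 + 1) % mod
--             ne2 = (e1 + e2) % mod
--             e1, e2 = ne1, ne2
--         else:
--             no1 = (o1 + e1 + e2 + 1) % mod
--             no2 = (o1 + o2) % mod
--             o1, o2 = no1, no2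
--
--     return (e1 + e2 + o1 + o2) % mod
-- ===== SOURCE B (Python) =====
-- from typing import List
--
-- def countStableSubsequences(nums: List[int]) -> int:
--     mod = 10 ** 9 + 7
--
--     # segment nums into maximal runs of equal parity, then process each run
--     # with a closed-form batch update instead of per-element steps
--     runs = []
--     i, n = 0, len(nums)
--     while i < n:
--         p = nums[i] % 2
--         j = i
--         while j < n and nums[j] % 2 == p:
--             j += 1
--         runs.append((p, j - i))
--         i = j
--
--     e1 = e2 = o1 = o2 = 0
--     for p, L in runs:
--         if p == 0:
--             A = (o1 + o2 + 1) % mod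
--             e2 = (e2 + L * e1 + A * (L * (L - 1) // 2)) % mod
--             e1 = (e1 + L * A) % mod
--         else:
--             B = (e1 + e2 + 1) % mod
--             o2 = (o2 + L * o1 + B * (L * (L - 1) // 2)) % mod
--             o1 = (o1 + L * B) % mod
--
--     return (e1 + e2 + o1 + o2) % mod
-- ===== Notes on version B (the rewrite author's own statement) =====
-- stated objective: alternative
-- what changed: B segments nums into maximal equal-parity runs and applies one closed-form batch update per run (using a triangular-number term L*(L-1)//2) instead of A's per-element DP step.
import Mathlib
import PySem

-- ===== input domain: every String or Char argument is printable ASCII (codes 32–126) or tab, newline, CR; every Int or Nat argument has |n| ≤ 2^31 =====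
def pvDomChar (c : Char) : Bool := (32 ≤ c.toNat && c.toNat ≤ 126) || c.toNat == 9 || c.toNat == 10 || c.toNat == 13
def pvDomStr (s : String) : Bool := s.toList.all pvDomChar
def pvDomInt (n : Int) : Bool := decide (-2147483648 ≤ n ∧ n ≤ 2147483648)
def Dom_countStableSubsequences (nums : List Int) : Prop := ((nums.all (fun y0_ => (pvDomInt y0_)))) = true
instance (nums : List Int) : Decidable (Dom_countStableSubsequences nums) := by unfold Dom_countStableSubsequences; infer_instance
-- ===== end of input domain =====

-- B replaces the per-element DP with a run-length segmentation of nums by parity and a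
-- closed-form batch update per run (same exact results; objective: alternative algorithm).
-- Python's '% (10**9+7)' is Int.emod exactly (positive divisor), written '%' below.

-- ===== PORT A =====
def pvM : Int := 1000000007

def pvStepA (s : Int × Int × Int × Int) (x : Int) : Int × Int × Int × Int :=
  match s with
  | (e1, e2, o1, o2) =>
    if PySem.Int.mod x 2 == 0 then
      ((e1 + o1 + o2 + 1) % pvM, (e1 + e2) % pvM, o1, o2)
    else
      (e1, e2, (o1 + e1 + e2 + 1) % pvM, (o1 + o2) % pvM)

def countStableSubsequences (nums : List Int) : Int :=
  match nums.foldl pvStepA (0, 0, 0, 0) with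
  | (e1, e2, o1, o2) => (e1 + e2 + o1 + o2) % pvM

-- ===== PORT B =====
-- maximal runs of equal parity, as (parity, length) pairs (the two while loops of Source B)
def pvRuns : List Int → List (Int × Int)
  | [] => []
  | x :: xs =>
    let p := PySem.Int.mod x 2
    ((p, (1 : Int) + (xs.takeWhile (fun y => PySem.Int.mod y 2 == p)).length) ::
      pvRuns (xs.dropWhile (fun y => PySem.Int.mod y 2 == p)))
termination_by l => l.length
decreasing_by
  exact Nat.lt_succ_of_le (List.length_dropWhile_le _ _)

def pvRunStep (s : Int × Int × Int × Int) (r : Int × Int) : Int × Int × Int × Int :=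
  match s, r with
  | (e1, e2, o1, o2), (p, L) =>
    if p == 0 then
      let A := (o1 + o2 + 1) % pvM
      ((e1 + L * A) % pvM,
       (e2 + L * e1 + A * PySem.Int.floordiv (L * (L - 1)) 2) % pvM, o1, o2)
    else
      let B := (e1 + e2 + 1) % pvM
      (e1, e2, (o1 + L * B) % pvM,
       (o2 + L * o1 + B * PySem.Int.floordiv (L * (L - 1)) 2) % pvM)

def countStableSubsequences_alt (nums : List Int) : Int :=
  match (pvRuns nums).foldl pvRunStep (0, 0, 0, 0) with
  | (e1, e2, o1, o2) => (e1 + e2 + o1 + o2) % pvM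

-- ===== PRECONDITION & SPEC =====
def Spec_countStableSubsequences (nums : List Int) (out : Int) : Prop := out = countStableSubsequences_alt nums
instance (nums : List Int) (out : Int) : Decidable (Spec_countStableSubsequences nums out) := by unfold Spec_countStableSubsequences; infer_instance

-- ===== CLAIM (what is proved, stated in full; the proofs are below) =====
def Claim_equal_countStableSubsequences : Prop := ∀ (nums : List Int), Dom_countStableSubsequences nums → Spec_countStableSubsequences nums (countStableSubsequences nums)

-- ===== LEMMAS AND PROOFS =====

-- state components already reduced mod pvM
def pvRed (s : Int × Int × Int × Int) : Prop :=
  s.1 % pvM = s.1 ∧ s.2.1 % pvM = s.2.1 ∧ s.2.2.1 % pvM = s.2.2.1 ∧ s.2.2.2 % pvM = s.2.2.2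

lemma pvemm (a : Int) : a % pvM % pvM = a % pvM := Int.emod_emod_of_dvd a dvd_rfl

lemma pvRed_runStep (s : Int × Int × Int × Int) (r : Int × Int) (h : pvRed s) : pvRed (pvRunStep s r) := by
  obtain ⟨e1, e2, o1, o2⟩ := s
  obtain ⟨p, L⟩ := r
  obtain ⟨h1, h2, h3, h4⟩ := h
  simp only [pvRunStep]
  split
  · exact ⟨pvemm _, pvemm _, h3, h4⟩
  · exact ⟨h1, h2, pvemm _, pvemm _⟩

-- triangular-number recurrence for Python's L*(L-1)//2
lemma pvTri (n : Int) : PySem.Int.floordiv ((n + 1) * n) 2 = PySem.Int.floordiv (n * (n - 1)) 2 + n := by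
  rw [PySem.Int.floordiv_eq_ediv_of_pos (by norm_num), PySem.Int.floordiv_eq_ediv_of_pos (by norm_num)]
  have h : (n + 1) * n = n * (n - 1) + n * 2 := by ring
  rw [h, Int.add_mul_ediv_right _ _ (by norm_num)]

-- closed form for an all-even run
lemma pvFoldEven (ys : List Int) : ∀ (e1 e2 o1 o2 : Int),
    (∀ y ∈ ys, PySem.Int.mod y 2 = 0) → e1 % pvM = e1 → e2 % pvM = e2 →
    List.foldl pvStepA (e1, e2, o1, o2) ys =
      ((e1 + (ys.length : Int) * ((o1 + o2 + 1) % pvM)) % pvM,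
       (e2 + (ys.length : Int) * e1 +
          ((o1 + o2 + 1) % pvM) * PySem.Int.floordiv ((ys.length : Int) * ((ys.length : Int) - 1)) 2) % pvM,
       o1, o2) := by
  induction ys with
  | nil =>
    intro e1 e2 o1 o2 _ h1 h2
    simp [h1, h2]
  | cons y ys ih =>
    intro e1 e2 o1 o2 hall h1 h2
    have hy : PySem.Int.mod y 2 = 0 := hall y (List.mem_cons_self ..)
    have hstep : pvStepA (e1, e2, o1, o2) y =
        ((e1 + o1 + o2 + 1) % pvM, (e1 + e2) % pvM, o1, o2) := by
      simp only [pvStepA, beq_iff_eq]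
      rw [if_pos hy]
    rw [List.foldl_cons, hstep,
      ih _ _ _ _ (fun y hy => hall y (List.mem_cons_of_mem _ hy)) (pvemm _) (pvemm _)]
    set n : Int := (ys.length : Int) with hn
    have hlen : ((y :: ys).length : Int) = n + 1 := by simp [hn]
    rw [hlen]
    set A : Int := (o1 + o2 + 1) % pvM with hA
    have hAm : Int.ModEq pvM A (o1 + o2 + 1) := pvemm _
    have hne1 : Int.ModEq pvM ((e1 + o1 + o2 + 1) % pvM) (e1 + A) := by
      calc (e1 + o1 + o2 + 1) % pvM ≡ e1 + o1 + o2 + 1 [ZMOD pvM] := pvemm _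
        _ = e1 + (o1 + o2 + 1) := by ring
        _ ≡ e1 + A [ZMOD pvM] := (hAm.symm.add_left e1)
    have hne2 : Int.ModEq pvM ((e1 + e2) % pvM) (e1 + e2) := pvemm _
    refine Prod.ext ?_ (Prod.ext ?_ rfl)
    · show ((e1 + o1 + o2 + 1) % pvM + n * A) % pvM = (e1 + (n + 1) * A) % pvM
      calc (e1 + o1 + o2 + 1) % pvM + n * A
          ≡ (e1 + A) + n * A [ZMOD pvM] := hne1.add_right _
        _ = e1 + (n + 1) * A := by ring
    · show ((e1 + e2) % pvM + n * ((e1 + o1 + o2 + 1) % pvM) +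
          A * PySem.Int.floordiv (n * (n - 1)) 2) % pvM =
        (e2 + (n + 1) * e1 + A * PySem.Int.floordiv ((n + 1) * (n + 1 - 1)) 2) % pvM
      have ht : (n + 1) * (n + 1 - 1) = (n + 1) * n := by ring
      rw [ht, pvTri]
      calc (e1 + e2) % pvM + n * ((e1 + o1 + o2 + 1) % pvM) + A * PySem.Int.floordiv (n * (n - 1)) 2
          ≡ (e1 + e2) + n * (e1 + A) + A * PySem.Int.floordiv (n * (n - 1)) 2 [ZMOD pvM] :=
            (hne2.add (hne1.mul_left n)).add_right _
        _ = e2 + (n + 1) * e1 + A * (PySem.Int.floordiv (n * (n - 1)) 2 + n) := by ring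
-- closed form for an all-odd run
lemma pvFoldOdd (ys : List Int) : ∀ (e1 e2 o1 o2 : Int),
    (∀ y ∈ ys, ¬ PySem.Int.mod y 2 = 0) → o1 % pvM = o1 → o2 % pvM = o2 →
    List.foldl pvStepA (e1, e2, o1, o2) ys =
      (e1, e2,
       (o1 + (ys.length : Int) * ((e1 + e2 + 1) % pvM)) % pvM,
       (o2 + (ys.length : Int) * o1 +
          ((e1 + e2 + 1) % pvM) * PySem.Int.floordiv ((ys.length : Int) * ((ys.length : Int) - 1)) 2) % pvM) := by
  induction ys with
  | nil =>
    intro e1 e2 o1 o2 _ h1 h2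
    simp [h1, h2]
  | cons y ys ih =>
    intro e1 e2 o1 o2 hall h1 h2
    have hy : ¬ PySem.Int.mod y 2 = 0 := hall y (List.mem_cons_self ..)
    have hstep : pvStepA (e1, e2, o1, o2) y =
        (e1, e2, (o1 + e1 + e2 + 1) % pvM, (o1 + o2) % pvM) := by
      simp only [pvStepA, beq_iff_eq]
      rw [if_neg hy]
    rw [List.foldl_cons, hstep,
      ih _ _ _ _ (fun y hy => hall y (List.mem_cons_of_mem _ hy)) (pvemm _) (pvemm _)]
    set n : Int := (ys.length : Int) with hn
    have hlen : ((y :: ys).length : Int) = n + 1 := by simp [hn]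
    rw [hlen]
    set B : Int := (e1 + e2 + 1) % pvM with hB
    have hBm : Int.ModEq pvM B (e1 + e2 + 1) := pvemm _
    have hno1 : Int.ModEq pvM ((o1 + e1 + e2 + 1) % pvM) (o1 + B) := by
      calc (o1 + e1 + e2 + 1) % pvM ≡ o1 + e1 + e2 + 1 [ZMOD pvM] := pvemm _
        _ = o1 + (e1 + e2 + 1) := by ring
        _ ≡ o1 + B [ZMOD pvM] := (hBm.symm.add_left o1)
    have hno2 : Int.ModEq pvM ((o1 + o2) % pvM) (o1 + o2) := pvemm _
    refine Prod.ext rfl (Prod.ext rfl (Prod.ext ?_ ?_))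
    · show ((o1 + e1 + e2 + 1) % pvM + n * B) % pvM = (o1 + (n + 1) * B) % pvM
      calc (o1 + e1 + e2 + 1) % pvM + n * B
          ≡ (o1 + B) + n * B [ZMOD pvM] := hno1.add_right _
        _ = o1 + (n + 1) * B := by ring
    · show ((o1 + o2) % pvM + n * ((o1 + e1 + e2 + 1) % pvM) +
          B * PySem.Int.floordiv (n * (n - 1)) 2) % pvM =
        (o2 + (n + 1) * o1 + B * PySem.Int.floordiv ((n + 1) * (n + 1 - 1)) 2) % pvM
      have ht : (n + 1) * (n + 1 - 1) = (n + 1) * n := by ring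
      rw [ht, pvTri]
      calc (o1 + o2) % pvM + n * ((o1 + e1 + e2 + 1) % pvM) + B * PySem.Int.floordiv (n * (n - 1)) 2
          ≡ (o1 + o2) + n * (o1 + B) + B * PySem.Int.floordiv (n * (n - 1)) 2 [ZMOD pvM] :=
            (hno2.add (hno1.mul_left n)).add_right _
        _ = o2 + (n + 1) * o1 + B * (PySem.Int.floordiv (n * (n - 1)) 2 + n) := by ring

lemma pvFoldRuns : ∀ (k : Nat) (nums : List Int), nums.length ≤ k →
    ∀ (s : Int × Int × Int × Int), pvRed s →
    List.foldl pvStepA s nums = List.foldl pvRunStep s (pvRuns nums) := by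
  intro k
  induction k with
  | zero =>
    intro nums hlen s _
    have : nums = [] := List.eq_nil_of_length_eq_zero (Nat.le_zero.mp hlen)
    simp [this, pvRuns]
  | succ k ih =>
    intro nums hlen s hs
    match nums with
    | [] => simp [pvRuns]
    | x :: xs =>
      obtain ⟨e1, e2, o1, o2⟩ := s
      set p : Int := PySem.Int.mod x 2 with hp
      set f : Int → Bool := fun y => PySem.Int.mod y 2 == p with hf
      have hsplit : x :: xs = (x :: xs.takeWhile f) ++ xs.dropWhile f := by
        simp [List.takeWhile_append_dropWhile]
      have hruns : pvRuns (x :: xs) =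
          (p, (1 : Int) + (xs.takeWhile f).length) :: pvRuns (xs.dropWhile f) := by
        rw [pvRuns]
      have hrun : List.foldl pvStepA (e1, e2, o1, o2) (x :: xs.takeWhile f) =
          pvRunStep (e1, e2, o1, o2) (p, (1 : Int) + (xs.takeWhile f).length) := by
        by_cases hp0 : p = 0
        · have hall : ∀ y ∈ x :: xs.takeWhile f, PySem.Int.mod y 2 = 0 := by
            intro y hy
            rcases List.mem_cons.mp hy with h | h
            · rw [h, ← hp, hp0]
            · have := List.mem_takeWhile_imp h
              simp only [hf, beq_iff_eq] at this
              rw [this, hp0]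
          rw [pvFoldEven _ _ _ _ _ hall hs.1 hs.2.1]
          have hL : (((x :: xs.takeWhile f).length : Nat) : Int) =
              (1 : Int) + (xs.takeWhile f).length := by
            simp; ring
          simp only [pvRunStep, hp0, hL]
          simp
        · have hall : ∀ y ∈ x :: xs.takeWhile f, ¬ PySem.Int.mod y 2 = 0 := by
            intro y hy
            rcases List.mem_cons.mp hy with h | h
            · rw [h, ← hp]; exact hp0
            · have := List.mem_takeWhile_imp h
              simp only [hf, beq_iff_eq] at this
              rw [this]; exact hp0
          rw [pvFoldOdd _ _ _ _ _ hall hs.2.2.1 hs.2.2.2]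
          have hL : (((x :: xs.takeWhile f).length : Nat) : Int) =
              (1 : Int) + (xs.takeWhile f).length := by
            simp; ring
          have hpne : (p == (0 : Int)) = false := by simpa using hp0
          simp only [pvRunStep, hpne, hL]
          simp
      have hrest : (xs.dropWhile f).length ≤ k := by
        have h1 := List.length_dropWhile_le f xs
        have h2 : xs.length ≤ k := by simpa using hlen
        omega
      calc List.foldl pvStepA (e1, e2, o1, o2) (x :: xs)
          = List.foldl pvStepA
              (List.foldl pvStepA (e1, e2, o1, o2) (x :: xs.takeWhile f))
              (xs.dropWhile f) := by conv_lhs => rw [hsplit, List.foldl_append]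
        _ = List.foldl pvRunStep
              (pvRunStep (e1, e2, o1, o2) (p, (1 : Int) + (xs.takeWhile f).length))
              (pvRuns (xs.dropWhile f)) := by
              rw [hrun]; exact ih _ hrest _ (pvRed_runStep _ _ hs)
        _ = List.foldl pvRunStep (e1, e2, o1, o2) (pvRuns (x :: xs)) := by
              rw [hruns, List.foldl_cons]

-- ===== VERDICT (by name: the statement is the Claim_ definition above) =====
theorem countStableSubsequences_spec : Claim_equal_countStableSubsequences := by
  intro nums _
  show countStableSubsequences nums = countStableSubsequences_alt nums
  unfold countStableSubsequences countStableSubsequences_alt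
  rw [pvFoldRuns nums.length nums le_rfl (0, 0, 0, 0) (by norm_num [pvRed, pvM])]
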